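-- pv_equiv track=rewrite | github.com/DryHop2/aoc-2025 | day07.py | step_quantum_row
-- ===== SOURCE A (Python) =====
-- def step_quantum_row(row: str, timelines: list[int]) -> list[int]:
--     cols = len(row)
--     next_timelines = [0] * cols
--
--     for c, count in enumerate(timelines):
--         if count == 0:
--             continue
--         cell = row[c]
--
--         if cell == "." or cell == "S":
--             next_timelines[c] += count
--         elif cell == "^":
--             if c > 0:
--                 next_timelines[c - 1] += count
--             if c < cols - 1:
--                 next_timelines[c + 1] += count
--         else:
--             pass
--
--     return next_timelines
-- ===== SOURCE B (Python) =====
-- def step_quantum_row(row: str, timelines: list[int]) -> list[int]: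
--     cols = len(row)
--     n = len(timelines)
--
--     def t(i: int) -> int:
--         return timelines[i] if 0 <= i < n else 0
--
--     result = []
--     for c in range(cols):
--         v = t(c) if row[c] == "." or row[c] == "S" else 0
--         if c > 0 and row[c - 1] == "^":
--             v += t(c - 1)
--         if c + 1 < cols and row[c + 1] == "^":
--             v += t(c + 1)
--         result.append(v)
--     return result
-- ===== Notes on version B (the rewrite author's own statement) =====
-- stated objective: alternative
-- what changed: gather/pull formulation: each output cell c is computed directly as the sum of its incoming contributions (stay from '.'/'S' at c, splits from '^' neighbours), instead of A's scatter/push loop that increments a mutable next array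
import Mathlib
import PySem

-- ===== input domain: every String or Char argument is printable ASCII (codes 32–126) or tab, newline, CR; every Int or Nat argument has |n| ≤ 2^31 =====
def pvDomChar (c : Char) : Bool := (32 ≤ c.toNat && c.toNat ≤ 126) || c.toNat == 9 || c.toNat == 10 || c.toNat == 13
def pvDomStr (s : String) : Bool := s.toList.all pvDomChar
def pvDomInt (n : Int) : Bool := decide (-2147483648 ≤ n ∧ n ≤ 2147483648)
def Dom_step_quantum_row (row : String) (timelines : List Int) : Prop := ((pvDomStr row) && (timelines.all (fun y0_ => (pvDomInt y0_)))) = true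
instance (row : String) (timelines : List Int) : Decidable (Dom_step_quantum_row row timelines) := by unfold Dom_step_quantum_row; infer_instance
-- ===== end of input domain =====

-- B recomputes each output cell by gathering its incoming contributions (pull) instead of A's
-- scatter/push loop over the input counts; return values agree on all inputs where A returns.
set_option maxRecDepth 8192
set_option maxHeartbeats 1000000


-- ===== PORT A =====
-- scatter/push: each (c, count) increments next_timelines at its targets
def step_quantum_row (row : String) (timelines : List Int) : List Int :=
  let cols : Int := PySem.Str.len row
  let next_timelines : List Int := List.replicate cols.toNat 0
  (PySem.List.enumerate timelines).foldl (fun next (p : Int × Int) =>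
    let c := p.1
    let count := p.2
    if count = 0 then next
    else
      match PySem.Str.pyGet? row c with   -- none = IndexError (excluded by Pre_)
      | none => next
      | some cell =>
        if cell = '.' ∨ cell = 'S' then
          PySem.List.pySetD next c (PySem.List.pyGetD next c 0 + count)
        else if cell = '^' then
          let next := if c > 0 then PySem.List.pySetD next (c - 1) (PySem.List.pyGetD next (c - 1) 0 + count) else next
          if c < cols - 1 then PySem.List.pySetD next (c + 1) (PySem.List.pyGetD next (c + 1) 0 + count) else next
        else next) next_timelines

-- ===== PORT B =====
-- gather/pull: each output cell sums the contributions that flow into it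
def step_quantum_row_alt (row : String) (timelines : List Int) : List Int :=
  let cs := row.toList
  let cols := cs.length
  let n := timelines.length
  let t : Nat → Int := fun i => if i < n then timelines.getD i 0 else 0
  (List.range cols).map (fun c =>
    let v := if cs.getD c ' ' = '.' ∨ cs.getD c ' ' = 'S' then t c else 0
    let v := if 0 < c ∧ cs.getD (c - 1) ' ' = '^' then v + t (c - 1) else v
    if c + 1 < cols ∧ cs.getD (c + 1) ' ' = '^' then v + t (c + 1) else v)

-- ===== PRECONDITION & SPEC =====
-- Pre_ excludes exactly the inputs on which Python A raises IndexError: a nonzero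
-- timeline count at an index ≥ len(row) makes A evaluate row[c] out of range.
def Pre_step_quantum_row (row : String) (timelines : List Int) : Prop :=
  ((timelines.drop row.toList.length).all (fun x => x = 0)) = true
instance (row : String) (timelines : List Int) : Decidable (Pre_step_quantum_row row timelines) := by unfold Pre_step_quantum_row; infer_instance
def pvWitness_step_quantum_row : String × List Int := ("^.S^", [3, 1, 2, 5])


def Spec_step_quantum_row (row : String) (timelines : List Int) (out : List Int) : Prop := out = step_quantum_row_alt row timelines
instance (row : String) (timelines : List Int) (out : List Int) : Decidable (Spec_step_quantum_row row timelines out) := by unfold Spec_step_quantum_row; infer_instance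

-- ===== CLAIM (what is proved, stated in full; the proofs are below) =====
def Claim_equal_step_quantum_row : Prop := ∀ (row : String) (timelines : List Int), Dom_step_quantum_row row timelines → Pre_step_quantum_row row timelines → Spec_step_quantum_row row timelines (step_quantum_row row timelines)

-- ===== LEMMAS AND PROOFS =====

-- A's per-element contribution to output cell j, when the element at column c carries count x.
def pvContrib (cs : List Char) (c : Nat) (x : Int) (j : Nat) : Int :=
  (if c = j ∧ (cs.getD c ' ' = '.' ∨ cs.getD c ' ' = 'S') ∧ c < cs.length then x else 0)
  + (if 0 < c ∧ j + 1 = c ∧ cs.getD c ' ' = '^' ∧ c < cs.length then x else 0)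
  + (if c + 1 < cs.length ∧ j = c + 1 ∧ cs.getD c ' ' = '^' then x else 0)

-- total incoming contribution to cell j from the timeline entries, columns starting at s
def pvGather (cs : List Char) (tl : List Int) (s : Nat) (j : Nat) : Int :=
  match tl with
  | [] => 0
  | x :: tl => pvContrib cs s x j + pvGather cs tl (s + 1) j

-- "pick element at absolute index i" recursion
def pvPick (tl : List Int) (s : Nat) (i : Nat) : Int :=
  match tl with
  | [] => 0
  | x :: tl => (if s = i then x else 0) + pvPick tl (s + 1) i

theorem pvPick_eq (tl : List Int) (s i : Nat) :
    pvPick tl s i = if s ≤ i then tl.getD (i - s) 0 else 0 := by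
  induction tl generalizing s with
  | nil => simp [pvPick]
  | cons x tl ih =>
    simp only [pvPick, ih]
    rcases Nat.lt_trichotomy s i with h | h | h
    · have h1 : s + 1 ≤ i := h
      have h2 : i - s = (i - (s + 1)) + 1 := by omega
      simp [h1, Nat.le_of_lt h, h2, List.getD]
      omega
    · subst h; simp
    · rw [if_neg (by omega : ¬ s = i), if_neg (by omega : ¬ s + 1 ≤ i), if_neg (by omega : ¬ s ≤ i)]
      ring

def pvFoldA (row : String) (cols : Int) : List Int → (Int × Int) → List Int :=
  fun next p =>
    if p.2 = 0 then next
    else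
      match PySem.Str.pyGet? row p.1 with
      | none => next
      | some cell =>
        if cell = '.' ∨ cell = 'S' then
          PySem.List.pySetD next p.1 (PySem.List.pyGetD next p.1 0 + p.2)
        else if cell = '^' then
          if p.1 < cols - 1 then
            PySem.List.pySetD (if p.1 > 0 then PySem.List.pySetD next (p.1 - 1) (PySem.List.pyGetD next (p.1 - 1) 0 + p.2) else next)
              (p.1 + 1) (PySem.List.pyGetD (if p.1 > 0 then PySem.List.pySetD next (p.1 - 1) (PySem.List.pyGetD next (p.1 - 1) 0 + p.2) else next) (p.1 + 1) 0 + p.2)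
          else (if p.1 > 0 then PySem.List.pySetD next (p.1 - 1) (PySem.List.pyGetD next (p.1 - 1) 0 + p.2) else next)
        else next

theorem step_quantum_row_eq_fold (row : String) (timelines : List Int) :
    step_quantum_row row timelines =
      (PySem.List.enumerate timelines).foldl (pvFoldA row (PySem.Str.len row))
        (List.replicate (PySem.Str.len row).toNat 0) := rfl

theorem pvGetD_set (l : List Int) (i j : Nat) (v : Int) :
    (l.set i v).getD j 0 = if i = j ∧ i < l.length then v else l.getD j 0 := by
  simp only [List.getD_eq_getElem?_getD, List.getElem?_set]
  split_ifs with h1 h2 h3 h4 <;> simp_all <;> omega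

theorem pvFoldA_length (row : String) (cols : Int) (next : List Int) (p : Int × Int) :
    (pvFoldA row cols next p).length = next.length := by
  unfold pvFoldA
  rcases hg : PySem.Str.pyGet? row p.1 with _ | cell <;>
    simp only [hg] <;> split_ifs <;> simp [PySem.List.length_pySetD]

theorem pvCharNe : ¬ (('^' : Char) = '.' ∨ ('^' : Char) = 'S') := by decide

theorem pvFoldA_step (row : String) (s : Nat) (x : Int) (next : List Int)
    (h : next.length = row.toList.length) (j : Nat) :
    (pvFoldA row (PySem.Str.len row) next ((s : Int), x)).getD j 0
      = next.getD j 0 + pvContrib row.toList s x j := by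
  have hlen : PySem.Str.len row = (row.length : Int) := by
    simp [PySem.Str.len_eq]
  unfold pvFoldA pvContrib
  simp only [String.length_toList] at h ⊢
  by_cases hx : x = 0
  · simp [hx]
  simp only [hx, if_false]
  by_cases hs : s < row.length
  · have hs' : s < row.toList.length := by simpa using hs
    have hget : PySem.Str.pyGet? row ((s : Nat) : Int) = some (row.toList.getD s ' ') := by
      simp [List.getElem?_eq_getElem hs', List.getD_eq_getElem _ _ hs']
    rw [hget]
    dsimp only
    by_cases hdot : row.toList.getD s ' ' = '.' ∨ row.toList.getD s ' ' = 'S'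
    · have hcar : ¬ row.toList.getD s ' ' = '^' := by
        rcases hdot with h' | h' <;> (rw [h']; decide)
      rw [if_pos hdot, PySem.List.pySetD_natCast, PySem.List.pyGetD_natCast, pvGetD_set]
      simp only [hdot, hcar, h, pvCharNe, true_and, false_and, and_false, if_false, add_zero]
      split_ifs <;> (try (exfalso; omega)) <;> (try ring) <;> (try simp_all) <;> (try ring) <;> (try omega) <;> (try exact add_comm _ _)
    · rw [if_neg hdot]
      by_cases hcar : row.toList.getD s ' ' = '^'
      · rw [if_pos hcar]
        by_cases hl : 0 < s
        · have hgt : ((s : Nat) : Int) > 0 := by exact_mod_cast hl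
          rw [if_pos hgt]
          have e1 : ((s : Nat) : Int) - 1 = ((s - 1 : Nat) : Int) := by omega
          by_cases hr : s + 1 < row.length
          · have hlt : ((s : Nat) : Int) < PySem.Str.len row - 1 := by rw [hlen]; omega
            have e2 : ((s : Nat) : Int) + 1 = ((s + 1 : Nat) : Int) := by omega
            rw [if_pos hlt, e1, e2, PySem.List.pySetD_natCast, PySem.List.pySetD_natCast,
              PySem.List.pyGetD_natCast, PySem.List.pyGetD_natCast, pvGetD_set, pvGetD_set, pvGetD_set]
            simp only [hdot, hcar, h, pvCharNe, List.length_set, true_and, and_true, false_and, and_false,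
              if_false, add_zero]
            clear hget hx hs' hlen hdot hcar
            (try clear hgt e1); (try clear e2); (try clear hlt)
            by_cases ejm : j + 1 = s
            · rw [show s - 1 = j by omega]
              split_ifs <;> (try ring) <;> (exfalso; omega)
            · by_cases ejp : j = s + 1
              · subst ejp
                split_ifs <;> (try ring) <;> (exfalso; omega)
              · split_ifs <;> (try ring) <;> (exfalso; omega)
          · have hlt : ¬ ((s : Nat) : Int) < PySem.Str.len row - 1 := by rw [hlen]; omega
            rw [if_neg hlt, e1, PySem.List.pySetD_natCast, PySem.List.pyGetD_natCast, pvGetD_set]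
            simp only [hdot, hcar, h, pvCharNe, true_and, and_true, false_and, and_false, if_false, add_zero]
            clear hget hx hs' hlen hdot hcar
            (try clear hgt e1); (try clear e2); (try clear hlt)
            by_cases ejm : j + 1 = s
            · rw [show s - 1 = j by omega]
              split_ifs <;> (try ring) <;> (exfalso; omega)
            · by_cases ejp : j = s + 1
              · subst ejp
                split_ifs <;> (try ring) <;> (exfalso; omega)
              · split_ifs <;> (try ring) <;> (exfalso; omega)
        · rw [if_neg (by omega : ¬ ((s : Nat) : Int) > 0)]
          have hs0 : s = 0 := by omega
          subst hs0
          by_cases hr : 0 + 1 < row.length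
          · have hlt : ((0 : Nat) : Int) < PySem.Str.len row - 1 := by rw [hlen]; omega
            have e2 : ((0 : Nat) : Int) + 1 = ((0 + 1 : Nat) : Int) := by omega
            rw [if_pos hlt, e2, PySem.List.pySetD_natCast, PySem.List.pyGetD_natCast, pvGetD_set]
            simp only [hdot, hcar, h, pvCharNe, true_and, and_true, false_and, and_false, if_false, add_zero]
            clear hget hx hs' hlen hdot hcar
            (try clear hgt e1); (try clear e2); (try clear hlt)
            by_cases ejp : j = 0 + 1
            · subst ejp
              split_ifs <;> (try ring) <;> (exfalso; omega)
            · split_ifs <;> (try ring) <;> (exfalso; omega)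
          · have hlt : ¬ ((0 : Nat) : Int) < PySem.Str.len row - 1 := by rw [hlen]; omega
            rw [if_neg hlt]
            simp only [hdot, hcar, h, pvCharNe, true_and, and_true, false_and, and_false, if_false, add_zero]
            clear hget hx hs' hlen hdot hcar
            (try clear hgt e1); (try clear e2); (try clear hlt)
            by_cases ejp : j = 0 + 1
            · subst ejp
              split_ifs <;> (try ring) <;> (exfalso; omega)
            · split_ifs <;> (try ring) <;> (exfalso; omega)
      · rw [if_neg hcar]
        have h1 : ¬ row.toList[s]?.getD ' ' = '.' := fun hh => hdot (Or.inl (by simpa [List.getD_eq_getElem?_getD] using hh))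
        have h2 : ¬ row.toList[s]?.getD ' ' = 'S' := fun hh => hdot (Or.inr (by simpa [List.getD_eq_getElem?_getD] using hh))
        have h3 : ¬ row.toList[s]?.getD ' ' = '^' := fun hh => hcar (by simpa [List.getD_eq_getElem?_getD] using hh)
        simp [h1, h2, h3, List.getD_eq_getElem?_getD]
  · have hget : PySem.Str.pyGet? row ((s : Nat) : Int) = none := by
      simp [List.getElem?_eq_none (by simpa using (by omega : row.length ≤ s))]
    rw [hget]
    dsimp only
    simp [(by omega : ¬ s < row.length), (by omega : ¬ s + 1 < row.length)]

theorem pvFold_gather (row : String) (tl : List Int) (s : Nat) (next : List Int)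
    (h : next.length = row.toList.length) (j : Nat) :
    ((PySem.List.enumerate tl ((s : Nat) : Int)).foldl (pvFoldA row (PySem.Str.len row)) next).getD j 0
      = next.getD j 0 + pvGather row.toList tl s j := by
  induction tl generalizing s next with
  | nil => simp [PySem.List.enumerate_nil, pvGather]
  | cons x tl ih =>
    rw [PySem.List.enumerate_cons, List.foldl_cons]
    have e : ((s : Nat) : Int) + 1 = ((s + 1 : Nat) : Int) := by omega
    rw [e, ih (s + 1) _ (by rw [pvFoldA_length]; exact h), pvFoldA_step row s x next h j]
    simp [pvGather]
    ring

theorem pvContrib_split (cs : List Char) (s : Nat) (x : Int) (j : Nat) (hj : j < cs.length) :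
    pvContrib cs s x j
      = (if cs.getD j ' ' = '.' ∨ cs.getD j ' ' = 'S' then (if s = j then x else 0) else 0)
      + (if 0 < j ∧ cs.getD (j - 1) ' ' = '^' then (if s = j - 1 then x else 0) else 0)
      + (if j + 1 < cs.length ∧ cs.getD (j + 1) ' ' = '^' then (if s = j + 1 then x else 0) else 0) := by
  unfold pvContrib
  by_cases e1 : s = j
  · subst e1
    simp [hj, (show ¬ (s + 1 = s) by omega), (show ¬ (s = s + 1) by omega)]
    try first | omega | (intros; omega) | (constructor <;> intros <;> omega)
  · by_cases e2 : s = j + 1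
    · subst e2
      simp [e1, hj, (show ¬ (j + 1 = j) by omega), (show ¬ (j = j + 1 + 1) by omega),
        (show (0 : Nat) < j + 1 by omega), (show ¬ (j + 1 = j - 1) by omega), and_comm]
      try first | omega | (intros; omega) | (constructor <;> intros <;> omega)
    · by_cases e3 : 0 < j ∧ s = j - 1
      · obtain ⟨hj0, e4⟩ := e3
        subst e4
        simp [hj, hj0, (show ¬ (j - 1 = j) by omega), (show ¬ (j = j - 1) by omega),
          (show j - 1 + 1 = j by omega), (show ¬ (j - 1 = j + 1) by omega),
          (show ¬ (j + 1 = j - 1) by omega)]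
        try first | omega | (intros; omega) | (constructor <;> intros <;> omega)
      · simp [e1, e2, (show ¬ (j + 1 = s) by omega), (show ¬ (j = s + 1) by omega),
          (show ¬ (s = j - 1) ∨ ¬ (0 < j) by omega)]
        try first | omega | (intros; omega) | (constructor <;> intros <;> omega)

theorem pvGather_eq (cs : List Char) (tl : List Int) (s : Nat) (j : Nat) (hj : j < cs.length) :
    pvGather cs tl s j
      = (if cs.getD j ' ' = '.' ∨ cs.getD j ' ' = 'S' then pvPick tl s j else 0)
      + (if 0 < j ∧ cs.getD (j - 1) ' ' = '^' then pvPick tl s (j - 1) else 0)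
      + (if j + 1 < cs.length ∧ cs.getD (j + 1) ' ' = '^' then pvPick tl s (j + 1) else 0) := by
  induction tl generalizing s with
  | nil => simp [pvGather, pvPick]
  | cons x tl ih =>
    simp only [pvGather, pvPick, ih (s + 1), pvContrib_split cs s x j hj]
    split_ifs <;> ring

-- ===== VERDICT (by name: the statement is the Claim_ definition above) =====
theorem step_quantum_row_spec : Claim_equal_step_quantum_row := by
  unfold Claim_equal_step_quantum_row
  intro row timelines _ _
  unfold Spec_step_quantum_row
  rw [step_quantum_row_eq_fold]
  unfold step_quantum_row_alt
  have hlen : PySem.Str.len row = (row.toList.length : Int) := PySem.Str.len_eq row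
  have htoNat : (PySem.Str.len row).toNat = row.toList.length := by rw [hlen]; omega
  have hA : ∀ j : Nat,
      ((PySem.List.enumerate timelines).foldl (pvFoldA row (PySem.Str.len row))
        (List.replicate (PySem.Str.len row).toNat 0)).getD j 0
        = pvGather row.toList timelines 0 j := by
    intro j
    have := pvFold_gather row timelines 0 (List.replicate (PySem.Str.len row).toNat 0)
      (by simp [htoNat]) j
    simpa [List.getD_replicate] using this
  apply List.ext_getElem
  · have : ∀ (cols : Int) (L : List (Int × Int)) (next : List Int), (L.foldl (pvFoldA row cols) next).length = next.length := by
      intro cols L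
      induction L with
      | nil => simp
      | cons p L ihL => intro next; rw [List.foldl_cons, ihL, pvFoldA_length]
    simp [this, htoNat]
  · intro j h1 h2
    have hj : j < row.toList.length := by simpa using h2
    rw [← List.getD_eq_getElem _ 0 h1, ← List.getD_eq_getElem _ 0 h2, hA j]
    rw [pvGather_eq row.toList timelines 0 j hj]
    have hp : ∀ i : Nat, pvPick timelines 0 i = timelines.getD i 0 := by
      intro i; rw [pvPick_eq]; simp
    have ht : ∀ i : Nat, (if i < timelines.length then timelines.getD i 0 else 0) = timelines.getD i 0 := by
      intro i
      split_ifs with h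
      · rfl
      · rw [List.getD_eq_default]; omega
    simp only [List.getD_eq_getElem?_getD, List.getElem?_map, List.getElem?_range hj]
    simp only [Option.map_some, Option.getD_some]
    simp only [← List.getD_eq_getElem?_getD]
    simp only [hp, ht]
    split_ifs <;> ring
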